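-- pv_equiv track=rewrite | github.com/anwarhaidar/jhu-en-705-743-sparse-window | calculate_sparsity.py | count_attended_positions
-- ===== SOURCE A (Python) =====
-- def count_attended_positions(window_size, dilation, seq_len):
--     """
--     Count exactly how many positions are attended in the sparse mask.
--     """
--     total_attended = 0
--
--     for i in range(seq_len):
--         # Local window: [max(0, i - window_size + 1), i]
--         window_start = max(0, i - window_size + 1)
--         window_count = i - window_start + 1
--
--         # Dilated positions: every dilation-th position before window
--         dilated_count = 0
--         dilated_pos = i - window_size - dilation
--         while dilated_pos >= 0:
--             dilated_count += 1
--             dilated_pos -= dilation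
--
--         total_attended += window_count + dilated_count
--
--     return total_attended
-- ===== SOURCE B (Python) =====
-- def tri_floor(x, d):
--     # sum_{m=0}^{x} m // d  for x >= -1 and d >= 1 (0 when x < 0)
--     q, r = divmod(x + 1, d)
--     return d * q * (q - 1) // 2 + r * q
--
--
-- def count_attended_positions(window_size, dilation, seq_len):
--     """
--     Closed-form count of attended positions in the sparse mask: the window part is
--     a triangular-number formula, the dilated part a closed form for a sum of floor
--     divisions. O(1) arithmetic instead of nested loops.
--     """
--     if seq_len <= 0:
--         return 0
--     w, d, n = window_size, dilation, seq_len
--     # window part: sum over i in range(n) of min(i + 1, w)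
--     m = min(w, n)
--     if m <= 0:
--         win = n * w
--     else:
--         win = m * (m + 1) // 2 + (n - m) * w
--     # dilated part: sum over s in [L, M] of s // d + 1, where s = i - w - d
--     M = n - 1 - w - d
--     L = max(0, -w - d)
--     if M < L:
--         dil = 0
--     else:
--         dil = (M - L + 1) + tri_floor(M, d) - tri_floor(L - 1, d)
--     return win + dil
-- ===== Notes on version B (the rewrite author's own statement) =====
-- stated objective: faster
-- what changed: replaces A's nested loops with a pure closed form: a triangular-number formula for the window part and a closed-form sum of floor divisions (via divmod) for the dilated part, O(1) arithmetic in total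
import Mathlib
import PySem

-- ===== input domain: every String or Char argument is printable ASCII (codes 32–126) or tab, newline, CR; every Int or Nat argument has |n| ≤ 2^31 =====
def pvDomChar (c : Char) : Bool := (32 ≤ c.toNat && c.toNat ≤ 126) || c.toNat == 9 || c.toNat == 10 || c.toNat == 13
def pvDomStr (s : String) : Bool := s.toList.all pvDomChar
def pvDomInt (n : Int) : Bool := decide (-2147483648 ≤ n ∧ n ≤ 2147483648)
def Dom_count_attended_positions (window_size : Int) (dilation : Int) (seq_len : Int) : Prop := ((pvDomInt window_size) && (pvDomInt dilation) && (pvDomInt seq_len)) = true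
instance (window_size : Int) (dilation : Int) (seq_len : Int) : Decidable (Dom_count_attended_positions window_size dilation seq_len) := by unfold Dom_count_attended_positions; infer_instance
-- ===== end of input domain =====

-- B computes the count in closed form (triangular-number window part, closed-form sum
-- of floor divisions for the dilated part) instead of A's nested loops; Pre_ excludes
-- only the inputs on which A's while loop never terminates (dilation ≤ 0 with the loop
-- body reachable).


-- ===== PORT A =====
-- the 'while dilated_pos >= 0: dilated_count += 1; dilated_pos -= dilation' loop;
-- the extra '1 ≤ dilation' conjunct is a totality guard only (Python diverges when the
-- body is reached with dilation ≤ 0; those inputs are outside Pre_)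
def pvDilLoop (dilated_pos : Int) (dilation : Int) (dilated_count : Int) : Int :=
  if _h : 0 ≤ dilated_pos ∧ 1 ≤ dilation then
    pvDilLoop (dilated_pos - dilation) dilation (dilated_count + 1)
  else dilated_count
termination_by (dilated_pos + 1).toNat
decreasing_by omega

def count_attended_positions (window_size : Int) (dilation : Int) (seq_len : Int) : Int :=
  (PySem.List.pyRange 0 seq_len 1).foldl
    (fun total_attended i =>
      total_attended +
        (i - max 0 (i - window_size + 1) + 1 + pvDilLoop (i - window_size - dilation) dilation 0)) 0

-- ===== PORT B =====
-- tri_floor(x, d) = sum_{m=0}^{x} m // d for x ≥ -1, d ≥ 1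
def pvTriFloor (x : Int) (d : Int) : Int :=
  let q := PySem.Int.floordiv (x + 1) d
  let r := PySem.Int.mod (x + 1) d
  PySem.Int.floordiv (d * q * (q - 1)) 2 + r * q

def count_attended_positions_alt (window_size : Int) (dilation : Int) (seq_len : Int) : Int :=
  if seq_len ≤ 0 then 0
  else
    let m := min window_size seq_len
    let win := if m ≤ 0 then seq_len * window_size
               else PySem.Int.floordiv (m * (m + 1)) 2 + (seq_len - m) * window_size
    let M := seq_len - 1 - window_size - dilation
    let L := max 0 (-window_size - dilation)
    let dil := if M < L then 0 else (M - L + 1) + pvTriFloor M dilation - pvTriFloor (L - 1) dilation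
    win + dil

-- ===== PRECONDITION & SPEC =====
-- Pre_ excludes exactly the inputs on which A never returns: with dilation ≤ 0 the
-- while loop is infinite as soon as some i in range(seq_len) reaches its body.
def Pre_count_attended_positions (window_size : Int) (dilation : Int) (seq_len : Int) : Prop :=
  1 ≤ dilation ∨ seq_len ≤ 0 ∨ seq_len - 1 < window_size + dilation
instance (window_size : Int) (dilation : Int) (seq_len : Int) : Decidable (Pre_count_attended_positions window_size dilation seq_len) := by unfold Pre_count_attended_positions; infer_instance

def pvWitness_count_attended_positions : Int × Int × Int := (3, 2, 12)

def Spec_count_attended_positions (window_size : Int) (dilation : Int) (seq_len : Int) (out : Int) : Prop := out = count_attended_positions_alt window_size dilation seq_len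
instance (window_size : Int) (dilation : Int) (seq_len : Int) (out : Int) : Decidable (Spec_count_attended_positions window_size dilation seq_len out) := by unfold Spec_count_attended_positions; infer_instance

-- ===== CLAIM (what is proved, stated in full; the proofs are below) =====
def Claim_equal_count_attended_positions : Prop := ∀ (window_size : Int) (dilation : Int) (seq_len : Int), Dom_count_attended_positions window_size dilation seq_len → Pre_count_attended_positions window_size dilation seq_len → Spec_count_attended_positions window_size dilation seq_len (count_attended_positions window_size dilation seq_len)

-- ===== LEMMAS AND PROOFS =====

-- proof-side names for the two halves of B's closed form (definitionally the two
-- let-bound summands of count_attended_positions_alt's else branch)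
def pvWinF (w : Int) (n : Int) : Int :=
  if min w n ≤ 0 then n * w
  else PySem.Int.floordiv (min w n * (min w n + 1)) 2 + (n - min w n) * w

def pvDilF (w : Int) (d : Int) (n : Int) : Int :=
  if n - 1 - w - d < max 0 (-w - d) then 0
  else (n - 1 - w - d - max 0 (-w - d) + 1) + pvTriFloor (n - 1 - w - d) d - pvTriFloor (max 0 (-w - d) - 1) d

theorem pvDilLoop_neg (pos d acc : Int) (h : pos < 0) : pvDilLoop pos d acc = acc := by
  rw [pvDilLoop, dif_neg (by omega)]

theorem pvDilLoop_eq_aux (d : Int) (hd : 1 ≤ d) :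
    ∀ (k : Nat) (pos acc : Int), pos.toNat ≤ k → 0 ≤ pos →
      pvDilLoop pos d acc = acc + pos / d + 1 := by
  intro k
  induction k with
  | zero =>
    intro pos acc hk hpos
    have hp0 : pos = 0 := by omega
    subst hp0
    rw [pvDilLoop, dif_pos ⟨le_refl 0, hd⟩, pvDilLoop_neg _ _ _ (by omega)]
    simp
  | succ k ih =>
    intro pos acc hk hpos
    rw [pvDilLoop, dif_pos ⟨hpos, hd⟩]
    by_cases hlt : pos - d < 0
    · rw [pvDilLoop_neg _ _ _ hlt]
      have : pos / d = 0 := Int.ediv_eq_zero_of_lt hpos (by omega)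
      omega
    · rw [ih (pos - d) (acc + 1) (by omega) (by omega)]
      rw [show pos - d = pos + -1 * d from by ring,
          Int.add_mul_ediv_right pos (-1) (show d ≠ 0 by omega)]
      omega

theorem pvDilLoop_eq (pos d acc : Int) (hd : 1 ≤ d) (hpos : 0 ≤ pos) :
    pvDilLoop pos d acc = acc + pos / d + 1 :=
  pvDilLoop_eq_aux d hd pos.toNat pos acc (le_refl _) hpos

theorem pvHalfEq (a k : Int) (h : a = 2 * k) : a / 2 = k := by
  rw [h]; exact Int.mul_ediv_cancel_left k (by norm_num)

theorem pvExistsHalf (q : Int) : ∃ k, q * (q - 1) = 2 * k := by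
  rcases Int.even_mul_succ_self (q - 1) with ⟨k, hk⟩
  exact ⟨k, by rw [show q * (q - 1) = (q - 1) * (q - 1 + 1) from by ring, hk]; ring⟩

-- triangular step: m(m+1)/2 = (m-1)m/2 + m (exact: consecutive products are even)
theorem pvTriStep (m : Int) (_hm : 1 ≤ m) : m * (m + 1) / 2 = (m - 1) * m / 2 + m := by
  obtain ⟨k, hk⟩ := pvExistsHalf m
  have h1 : m * (m + 1) = 2 * (k + m) := by
    have e : m * (m + 1) = m * (m - 1) + 2 * m := by ring
    rw [e, hk]; ring
  have h3 : (m - 1) * m = 2 * k := by rw [mul_comm (m - 1) m]; exact hk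
  rw [pvHalfEq _ _ h1, pvHalfEq _ _ h3]

theorem pvTriFloor_ediv (x d : Int) (hd : 0 < d) :
    pvTriFloor x d =
      d * ((x + 1) / d) * ((x + 1) / d - 1) / 2 + ((x + 1) % d) * ((x + 1) / d) := by
  simp only [pvTriFloor, PySem.Int.floordiv_eq_ediv_of_pos hd, PySem.Int.mod_eq_emod_of_pos hd,
    PySem.Int.floordiv_eq_ediv_of_pos (show (0:Int) < 2 by norm_num)]

-- key step: tri_floor(x, d) = tri_floor(x-1, d) + x // d  for x ≥ 0, d ≥ 1
theorem pvTriFloor_step (x d : Int) (_hx : 0 ≤ x) (hd : 1 ≤ d) :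
    pvTriFloor x d = pvTriFloor (x - 1) d + x / d := by
  have hd0 : 0 < d := by omega
  rw [pvTriFloor_ediv x d hd0, pvTriFloor_ediv (x - 1) d hd0,
      show x - 1 + 1 = x from by ring]
  have hxeq : d * (x / d) + x % d = x := Int.ediv_add_emod x d
  have hr0 : 0 ≤ x % d := Int.emod_nonneg x (by omega)
  have hrd : x % d < d := Int.emod_lt_of_pos x hd0
  by_cases hcase : x % d + 1 < d
  · have hq2 : (x + 1) / d = x / d := by
      rw [show x + 1 = (x % d + 1) + (x / d) * d from by
            have hc : x / d * d = d * (x / d) := mul_comm _ _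
            linarith [hxeq, hc],
          Int.add_mul_ediv_right _ _ (show d ≠ 0 by omega),
          Int.ediv_eq_zero_of_lt (by omega) (by omega)]
      omega
    have hr2 : (x + 1) % d = x % d + 1 := by
      rw [show x + 1 = (x % d + 1) + d * (x / d) from by linarith [hxeq],
          Int.add_mul_emod_self_left, Int.emod_eq_of_lt (by omega) (by omega)]
    rw [hq2, hr2]; ring
  · have hr1d : x % d = d - 1 := by omega
    have hxd : x + 1 = d * (x / d + 1) := by
      have he : d * (x / d + 1) = d * (x / d) + d := by ring
      linarith [hxeq, hr1d, he]
    have hq2 : (x + 1) / d = x / d + 1 := by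
      rw [hxd]; exact Int.mul_ediv_cancel_left _ (by omega)
    have hr2 : (x + 1) % d = 0 := by rw [hxd]; exact Int.mul_emod_right d _
    rw [hq2, hr2]
    obtain ⟨k, hk⟩ := pvExistsHalf (x / d)
    obtain ⟨k', hk'⟩ := pvExistsHalf (x / d + 1)
    have hdq' : d * (x / d + 1) * (x / d + 1 - 1) = 2 * (d * k') := by
      rw [show d * (x / d + 1) * (x / d + 1 - 1) = d * ((x / d + 1) * (x / d + 1 - 1)) from by ring, hk']
      ring
    have hdq : d * (x / d) * (x / d - 1) = 2 * (d * k) := by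
      rw [show d * (x / d) * (x / d - 1) = d * ((x / d) * (x / d - 1)) from by ring, hk]
      ring
    rw [pvHalfEq _ _ hdq', pvHalfEq _ _ hdq]
    have hq : (x / d + 1) * (x / d + 1 - 1) = x / d * (x / d - 1) + 2 * (x / d) := by ring
    have hkk : k' = k + x / d := by linarith [hk, hk', hq]
    rw [hkk, hr1d]; ring

theorem pvFormZero (w d : Int) : pvWinF w 0 + pvDilF w d 0 = 0 := by
  unfold pvWinF pvDilF
  rw [if_pos (show min w 0 ≤ 0 from by omega),
      if_pos (show (0:Int) - 1 - w - d < max 0 (-w - d) from by omega)]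
  ring

theorem pvAltEqForm (w d n : Int) (hn : 0 ≤ n) :
    count_attended_positions_alt w d n = pvWinF w n + pvDilF w d n := by
  unfold count_attended_positions_alt
  by_cases h0 : n ≤ 0
  · rw [if_pos h0, show n = 0 from by omega, pvFormZero]
  · rw [if_neg h0]; rfl

theorem pvWinStep (w n : Int) (hn : 0 ≤ n) : pvWinF w (n + 1) = pvWinF w n + min (n + 1) w := by
  unfold pvWinF
  rcases le_or_gt w 0 with hw | hw
  · rw [if_pos (show min w (n + 1) ≤ 0 from by omega), if_pos (show min w n ≤ 0 from by omega),
        show min (n + 1) w = w from by omega]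
    ring
  · by_cases hn0 : n = 0
    · subst hn0
      rw [if_neg (show ¬ min w (0 + 1) ≤ 0 from by omega), if_pos (show min w 0 ≤ 0 from by omega),
          show min w (0 + 1) = 1 from by omega, show min (0 + 1) w = 1 from by omega,
          PySem.Int.floordiv_eq_ediv_of_pos (show (0:Int) < 2 by norm_num)]
      norm_num
    · rcases le_or_gt w n with hwn | hwn
      · rw [if_neg (show ¬ min w (n + 1) ≤ 0 from by omega), if_neg (show ¬ min w n ≤ 0 from by omega),
            show min w (n + 1) = w from by omega, show min w n = w from by omega,
            show min (n + 1) w = w from by omega]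
        ring
      · rw [if_neg (show ¬ min w (n + 1) ≤ 0 from by omega), if_neg (show ¬ min w n ≤ 0 from by omega),
            show min w (n + 1) = n + 1 from by omega, show min w n = n from by omega,
            show min (n + 1) w = n + 1 from by omega]
        simp only [PySem.Int.floordiv_eq_ediv_of_pos (show (0:Int) < 2 by norm_num)]
        rw [pvTriStep (n + 1) (by omega), show (n + 1 - 1) * (n + 1) = n * (n + 1) from by ring]
        ring

theorem pvDilStep (w d n : Int) (hn : 0 ≤ n) (hd : 0 ≤ n - w - d → 1 ≤ d) :
    pvDilF w d (n + 1) = pvDilF w d n + (if 0 ≤ n - w - d then (n - w - d) / d + 1 else 0) := by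
  unfold pvDilF
  rw [show n + 1 - 1 - w - d = n - w - d from by ring]
  by_cases h1 : n - w - d < max 0 (-w - d)
  · rw [if_pos h1, if_pos (by omega), if_neg (show ¬ 0 ≤ n - w - d from by omega)]
    ring
  · have hs : 0 ≤ n - w - d := by omega
    have hd1 : 1 ≤ d := hd hs
    rw [if_neg (by omega : ¬ n - w - d < max 0 (-w - d)), if_pos hs,
        pvTriFloor_step (n - w - d) d hs hd1]
    by_cases h2 : n - 1 - w - d < max 0 (-w - d)
    · have hML : n - w - d = max 0 (-w - d) := by omega
      rw [if_pos h2, show n - w - d - 1 = max 0 (-w - d) - 1 from by omega]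
      linarith [hML]
    · rw [if_neg h2, show n - w - d - 1 = n - 1 - w - d from by ring]
      ring

theorem pvAStep (w d n : Int) (hn : 0 ≤ n) :
    count_attended_positions w d (n + 1) =
      count_attended_positions w d n +
        (n - max 0 (n - w + 1) + 1 + pvDilLoop (n - w - d) d 0) := by
  unfold count_attended_positions
  rw [PySem.List.pyRange_one_succ_right (by omega : (0:Int) ≤ n), List.foldl_append]
  simp only [List.foldl_cons, List.foldl_nil]

theorem pvATermEq (w d n : Int) (hd : 0 ≤ n - w - d → 1 ≤ d) :
    n - max 0 (n - w + 1) + 1 + pvDilLoop (n - w - d) d 0 =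
      min (n + 1) w + (if 0 ≤ n - w - d then (n - w - d) / d + 1 else 0) := by
  by_cases hs : 0 ≤ n - w - d
  · have hd1 := hd hs
    rw [pvDilLoop_eq _ _ _ hd1 hs, if_pos hs]
    have hwin : n - max 0 (n - w + 1) + 1 = min (n + 1) w := by omega
    linarith [hwin]
  · rw [pvDilLoop_neg _ _ _ (by omega), if_neg hs]
    omega

theorem pvPreMono (w d n : Int) (_hn : 0 ≤ n) (h : Pre_count_attended_positions w d (n + 1)) :
    Pre_count_attended_positions w d n := by
  unfold Pre_count_attended_positions at *; omega

theorem pvMainNat : ∀ (k : Nat) (w d : Int), Pre_count_attended_positions w d (k : Int) →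
    count_attended_positions w d (k : Int) = pvWinF w (k : Int) + pvDilF w d (k : Int) := by
  intro k
  induction k with
  | zero =>
    intro w d _
    simp only [Nat.cast_zero]
    rw [pvFormZero]
    unfold count_attended_positions
    rw [PySem.List.pyRange_one_eq_nil (le_refl 0)]
    rfl
  | succ k ih =>
    intro w d hpre
    have hk0 : (0:Int) ≤ (k : Int) := by omega
    have hcast : ((k + 1 : Nat) : Int) = (k : Int) + 1 := by push_cast; ring
    rw [hcast] at hpre ⊢
    have hd : 0 ≤ (k : Int) - w - d → 1 ≤ d := by
      intro hs; unfold Pre_count_attended_positions at hpre; omega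
    rw [pvAStep w d (k : Int) hk0, ih w d (pvPreMono w d (k : Int) hk0 hpre),
        pvWinStep w (k : Int) hk0, pvDilStep w d (k : Int) hk0 hd]
    linarith [pvATermEq w d (k : Int) hd]

-- ===== VERDICT (by name: the statement is the Claim_ definition above) =====
theorem count_attended_positions_spec : Claim_equal_count_attended_positions := by
  intro w d n _hdom hpre
  unfold Spec_count_attended_positions
  by_cases hn : n ≤ 0
  · unfold count_attended_positions count_attended_positions_alt
    rw [PySem.List.pyRange_one_eq_nil hn, if_pos hn]
    rfl
  · have hn' : (0:Int) ≤ n := by omega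
    have hcast : ((n.toNat : Nat) : Int) = n := Int.toNat_of_nonneg hn'
    rw [pvAltEqForm w d n hn', ← hcast]
    exact pvMainNat n.toNat w d (by rw [hcast]; exact hpre)
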